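-- pv_equiv track=rewrite | github.com/ciwanceylan/dirswitch-experiments-tmlr2025 | reachnes-tmlr2025/src/reachnes/reduction.py | fix_num_oversampling_and_block_size
-- ===== SOURCE A (Python) =====
-- def fix_num_oversampling_and_block_size(
--     k: int, num_oversampling: int, block_size: int, num_nodes: int
-- ):
--     num_oversampling = min(num_nodes - k, num_oversampling)
--     block_size_residual = (k + num_oversampling) % block_size
--     if block_size_residual > 0 and (k + num_oversampling) == num_nodes:
--         # In this the oversampling should not be changed.
--         block_size = 1
--     elif block_size_residual > 0:
--         # Try to increase the num_oversampling to match the block size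
--         num_oversampling = num_oversampling + block_size - block_size_residual
--         num_oversampling, block_size = fix_num_oversampling_and_block_size(
--             k, num_oversampling, block_size, num_nodes
--         )
--     return num_oversampling, block_size
-- ===== SOURCE B (Python) =====
-- def fix_num_oversampling_and_block_size(
--     k: int, num_oversampling: int, block_size: int, num_nodes: int
-- ):
--     # Iterative version: the tail recursion becomes an explicit loop.
--     num_oversampling = min(num_nodes - k, num_oversampling)
--     while True:
--         residual = (k + num_oversampling) % block_size
--         if residual <= 0:
--             break
--         if k + num_oversampling == num_nodes:
--             block_size = 1
--             break
--         num_oversampling = min(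
--             num_nodes - k, num_oversampling + block_size - residual
--         )
--     return num_oversampling, block_size
-- ===== Notes on version B (the rewrite author's own statement) =====
-- stated objective: simpler
-- what changed: The tail recursion (which re-caps num_oversampling at the start of every call) is rewritten as an explicit while loop over the same state, with the cap applied once up front and again at each update; no recursion, no re-entry.
import Mathlib
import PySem

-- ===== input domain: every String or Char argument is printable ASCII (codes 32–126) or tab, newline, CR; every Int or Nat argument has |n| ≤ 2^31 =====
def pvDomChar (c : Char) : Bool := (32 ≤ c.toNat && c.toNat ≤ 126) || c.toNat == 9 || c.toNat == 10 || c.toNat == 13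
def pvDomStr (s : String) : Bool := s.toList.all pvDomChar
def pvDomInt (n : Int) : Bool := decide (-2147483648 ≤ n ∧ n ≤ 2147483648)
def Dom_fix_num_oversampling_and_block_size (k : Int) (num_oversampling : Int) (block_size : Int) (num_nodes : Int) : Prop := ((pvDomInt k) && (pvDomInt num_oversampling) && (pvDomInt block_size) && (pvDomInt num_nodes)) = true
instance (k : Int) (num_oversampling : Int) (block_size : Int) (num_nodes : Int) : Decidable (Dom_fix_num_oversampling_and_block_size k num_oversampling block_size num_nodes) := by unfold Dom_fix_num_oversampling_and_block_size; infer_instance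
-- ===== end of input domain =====

-- B rewrites A's tail recursion as an explicit while loop over the same state (objective: simpler).

-- A fact about Python '%' (PySem.Int.mod) cited by the ports' termination proofs.
theorem pvMod_pos_bounds {a b r : Int} (hb : b ≠ 0) (hr : r = PySem.Int.mod a b)
    (h0 : 0 < r) : 0 < b ∧ r < b := by
  rcases lt_trichotomy b 0 with hlt | he | hgt
  · have := (PySem.Int.mod_neg_bounds a hlt).2
    omega
  · exact absurd he hb
  · exact ⟨hgt, hr ▸ PySem.Int.mod_lt a hgt⟩

-- ===== PORT A =====
-- Literal port of A's recursion.  Python's '%' raises ZeroDivisionError when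
-- block_size = 0 (excluded by Pre_); that branch is only a totality guard.
def fix_num_oversampling_and_block_size (k : Int) (num_oversampling : Int) (block_size : Int) (num_nodes : Int) : Int × Int :=
  let n' := min (num_nodes - k) num_oversampling
  if hb : block_size = 0 then (n', block_size)
  else
    let r := PySem.Int.mod (k + n') block_size
    if r > 0 ∧ k + n' = num_nodes then (n', 1)
    else if hr : r > 0 then
      fix_num_oversampling_and_block_size k (n' + block_size - r) block_size num_nodes
    else (n', block_size)
termination_by ((num_nodes - k) - min (num_nodes - k) num_oversampling).toNat
decreasing_by
  rename_i hne
  have e1 : n' = min (num_nodes - k) num_oversampling := rfl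
  have hr' : 0 < PySem.Int.mod (k + n') block_size := hr
  obtain ⟨hbpos, hlt⟩ := pvMod_pos_bounds hb rfl hr'
  have h1 : n' ≤ num_nodes - k := by rw [e1]; exact min_le_left _ _
  have h2 : k + n' ≠ num_nodes := fun hc => hne ⟨hr, hc⟩
  rw [← e1]
  simp only [min_def]
  split_ifs <;> omega

-- ===== PORT B =====
-- The while loop of Source B: the loop state is num_oversampling (block_size is never
-- changed before a break, so it stays a parameter).  The block_size = 0 branch
-- (where Python raises) is only a totality guard.
def pvAlignLoop (k : Int) (block_size : Int) (num_nodes : Int) (n : Int) : Int × Int :=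
  if hb : block_size = 0 then (n, block_size)
  else
    let r := PySem.Int.mod (k + n) block_size
    if hr : r ≤ 0 then (n, block_size)
    else if he : k + n = num_nodes then (n, 1)
    else pvAlignLoop k block_size num_nodes (min (num_nodes - k) (n + block_size - r))
termination_by (if num_nodes - k < n then 1 else 0) + 2 * ((num_nodes - k) - n).toNat
decreasing_by
  have hr' : 0 < PySem.Int.mod (k + n) block_size := not_le.mp hr
  obtain ⟨hbpos, hlt⟩ := pvMod_pos_bounds hb rfl hr'
  by_cases hle : n ≤ num_nodes - k
  · have hn : n < num_nodes - k := by
      rcases lt_or_eq_of_le hle with h' | h'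
      · exact h'
      · exact absurd (by omega) he

    simp only [min_def]
    split_ifs <;> omega
  · simp only [min_def]
    split_ifs <;> omega

def fix_num_oversampling_and_block_size_alt (k : Int) (num_oversampling : Int) (block_size : Int) (num_nodes : Int) : Int × Int :=
  pvAlignLoop k block_size num_nodes (min (num_nodes - k) num_oversampling)

-- ===== PRECONDITION & SPEC =====
-- Pre_ excludes only block_size = 0, where Python's '%' raises ZeroDivisionError.
def Pre_fix_num_oversampling_and_block_size (k : Int) (num_oversampling : Int) (block_size : Int) (num_nodes : Int) : Prop := block_size ≠ 0
instance (k : Int) (num_oversampling : Int) (block_size : Int) (num_nodes : Int) : Decidable (Pre_fix_num_oversampling_and_block_size k num_oversampling block_size num_nodes) := by unfold Pre_fix_num_oversampling_and_block_size; infer_instance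

def pvWitness_fix_num_oversampling_and_block_size : Int × Int × Int × Int := (3, 5, 4, 10)

def Spec_fix_num_oversampling_and_block_size (k : Int) (num_oversampling : Int) (block_size : Int) (num_nodes : Int) (out : Int × Int) : Prop := out = fix_num_oversampling_and_block_size_alt k num_oversampling block_size num_nodes
instance (k : Int) (num_oversampling : Int) (block_size : Int) (num_nodes : Int) (out : Int × Int) : Decidable (Spec_fix_num_oversampling_and_block_size k num_oversampling block_size num_nodes out) := by unfold Spec_fix_num_oversampling_and_block_size; infer_instance

-- ===== CLAIM (what is proved, stated in full; the proofs are below) =====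
def Claim_equal_fix_num_oversampling_and_block_size : Prop := ∀ (k : Int) (num_oversampling : Int) (block_size : Int) (num_nodes : Int), Dom_fix_num_oversampling_and_block_size k num_oversampling block_size num_nodes → Pre_fix_num_oversampling_and_block_size k num_oversampling block_size num_nodes → Spec_fix_num_oversampling_and_block_size k num_oversampling block_size num_nodes (fix_num_oversampling_and_block_size k num_oversampling block_size num_nodes)

-- ===== LEMMAS AND PROOFS =====

-- Re-capping an already-capped argument is a no-op, so A at any argument equals A at
-- the capped argument.
theorem fix_cap (k n bs N : Int) :
    fix_num_oversampling_and_block_size k n bs N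
      = fix_num_oversampling_and_block_size k (min (N - k) n) bs N := by
  conv_lhs => rw [fix_num_oversampling_and_block_size.eq_def]
  conv_rhs => rw [fix_num_oversampling_and_block_size.eq_def]
  rw [min_eq_right (min_le_left (N - k) n)]

-- On capped arguments A's recursion and B's loop step identically.
theorem fix_eq_loop (k bs N n : Int) (hn : n ≤ N - k) :
    fix_num_oversampling_and_block_size k n bs N = pvAlignLoop k bs N n := by
  rw [fix_num_oversampling_and_block_size.eq_def, pvAlignLoop.eq_def,
    min_eq_right hn]
  by_cases hb : bs = 0
  · rw [dif_pos hb, dif_pos hb]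
  · rw [dif_neg hb, dif_neg hb]
    by_cases hr : 0 < PySem.Int.mod (k + n) bs
    · by_cases he : k + n = N
      · rw [if_pos ⟨hr, he⟩, dif_neg (not_le.mpr hr), dif_pos he]
      · obtain ⟨hbpos, hlt⟩ := pvMod_pos_bounds hb rfl hr
        have hn' : n < N - k := by omega
        rw [if_neg (fun hc => he hc.2), dif_pos hr, dif_neg (not_le.mpr hr), dif_neg he]
        rw [fix_cap]
        exact fix_eq_loop k bs N (min (N - k) (n + bs - PySem.Int.mod (k + n) bs))
          (min_le_left _ _)
    · rw [if_neg (fun hc => hr hc.1), dif_neg hr, dif_pos (not_lt.mp hr)]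
termination_by ((N - k) - n).toNat
decreasing_by
  have h1 : n + 1 ≤ min (N - k) (n + bs - PySem.Int.mod (k + n) bs) :=
    le_min (by omega) (by omega)
  omega

-- ===== VERDICT (by name: the statement is the Claim_ definition above) =====
theorem fix_num_oversampling_and_block_size_spec : Claim_equal_fix_num_oversampling_and_block_size := by
  intro k n bs N _ hpre
  unfold Spec_fix_num_oversampling_and_block_size fix_num_oversampling_and_block_size_alt
  rw [fix_cap]
  exact fix_eq_loop k bs N (min (N - k) n) (min_le_left _ _)
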